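-- pv_equiv track=rewrite | github.com/Aleksey-Danchin/todolera | 5 вариант/15/main.py | f
-- ===== SOURCE A (Python) =====
-- def f(A):
--     for x in range(1, 1000):
--         a = x % A == 0
--         b = x % 18 == 0
--         c = x % 81 == 0
--
--         if not(a or not b or not c):
--             return False
--
--     return True
-- ===== SOURCE B (Python) =====
-- def f(A):
--     for m in range(162, 1000, 162):
--         if m % A != 0:
--             return False
--     return True
-- ===== Notes on version B (the rewrite author's own statement) =====
-- stated objective: simpler
-- what changed: B drops the 999-iteration scan with its 18/81 divisibility tests and checks only the six multiples of lcm(18,81)=162 below 1000, since those are exactly the x where A can return False.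
import Mathlib
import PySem

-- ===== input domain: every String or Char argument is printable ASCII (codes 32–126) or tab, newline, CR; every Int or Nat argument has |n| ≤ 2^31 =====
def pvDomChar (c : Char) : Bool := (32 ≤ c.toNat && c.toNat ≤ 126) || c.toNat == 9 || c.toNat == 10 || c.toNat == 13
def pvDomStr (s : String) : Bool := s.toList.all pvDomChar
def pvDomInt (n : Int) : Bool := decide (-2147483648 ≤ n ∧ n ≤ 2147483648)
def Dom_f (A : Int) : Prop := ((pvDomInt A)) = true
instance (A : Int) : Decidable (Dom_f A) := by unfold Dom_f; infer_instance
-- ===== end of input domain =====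

-- B checks only the six multiples of lcm(18,81)=162 below 1000 instead of scanning all x in 1..999.

-- ===== PORT A =====
-- for x in range(1,1000): a = x%A==0; b = x%18==0; c = x%81==0; if not(a or not b or not c): return False / return True
def f (A : Int) : Bool :=
  (PySem.List.pyRange 1 1000 1).all (fun x =>
    let a : Bool := PySem.Int.mod x A == 0
    let b : Bool := PySem.Int.mod x 18 == 0
    let c : Bool := PySem.Int.mod x 81 == 0
    (a || !b || !c))

-- ===== PORT B =====
-- for m in range(162,1000,162): if m % A != 0: return False / return True
def f_alt (A : Int) : Bool :=
  (PySem.List.pyRange 162 1000 162).all (fun m => PySem.Int.mod m A == 0)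

-- ===== PRECONDITION & SPEC =====
-- A = 0 is excluded: x % 0 raises ZeroDivisionError in both programs.
def Pre_f (A : Int) : Prop := A ≠ 0
instance (A : Int) : Decidable (Pre_f A) := by unfold Pre_f; infer_instance
def pvWitness_f : Int := 7
def Spec_f (A : Int) (out : Bool) : Prop := out = f_alt A
instance (A : Int) (out : Bool) : Decidable (Spec_f A out) := by unfold Spec_f; infer_instance

-- ===== CLAIM (what is proved, stated in full; the proofs are below) =====
def Claim_equal_f : Prop := ∀ (A : Int), Dom_f A → Pre_f A → Spec_f A (f A)

-- ===== LEMMAS AND PROOFS =====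

-- A's per-element test succeeds trivially unless x is divisible by both 18 and 81,
-- so the full scan equals the divisibility check over the filtered list.
theorem pv_all_filter (A : Int) (xs : List Int) :
    xs.all (fun x =>
      ((PySem.Int.mod x A == 0) || !(PySem.Int.mod x 18 == 0) || !(PySem.Int.mod x 81 == 0)))
    = (xs.filter (fun x => (PySem.Int.mod x 18 == 0) && (PySem.Int.mod x 81 == 0))).all
        (fun x => PySem.Int.mod x A == 0) := by
  induction xs with
  | nil => rfl
  | cons x xs ih =>
    by_cases h18 : (PySem.Int.mod x 18 == 0) = true <;>
      by_cases h81 : (PySem.Int.mod x 81 == 0) = true <;>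
        simp only [Bool.not_eq_true] at h18 h81 <;>
          simp only [List.all_cons, List.filter_cons, h18, h81, Bool.not_true,
            Bool.not_false, Bool.or_true, Bool.or_false, Bool.and_true, Bool.true_and,
            Bool.and_false, if_true, List.all_cons, ih] <;> simp

-- the filter of range(1,1000) keeps exactly the multiples of 162 = range(162,1000,162)
set_option maxRecDepth 40000 in
theorem pv_filter_range :
    ((PySem.List.pyRange 1 1000 1).filter
      (fun x => (PySem.Int.mod x 18 == 0) && (PySem.Int.mod x 81 == 0)))
    = PySem.List.pyRange 162 1000 162 := by decide

-- ===== VERDICT (by name: the statement is the Claim_ definition above) =====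
theorem f_spec : Claim_equal_f := by
  intro A _ _
  unfold Spec_f
  simp only [f, f_alt]
  rw [pv_all_filter A, pv_filter_range]
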